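-- pv_equiv track=rewrite | github.com/dreramirez91/CodingExercises | advent/2015/day_1.py | which_floor
-- ===== SOURCE A (Python) =====
-- def which_floor(instructions):
--     # Part 2
--     floor = 0
--     for i in range(len(instructions)):
--         if instructions[i] == "(":
--             floor += 1
--         elif instructions[i] == ")":
--             floor -= 1
--         if floor == -1:
--             return i + 1
--     # Part 1
--     floor = 0
--     for instruction in instructions:
--         if instruction == "(":
--             floor += 1
--         elif instruction == ")":
--             floor -= 1
--     return floor
-- ===== SOURCE B (Python) =====
-- def which_floor(instructions):
--     # prefix-sum table: prefix[k] = floor after the first k instructions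
--     prefix = [0]
--     for c in instructions:
--         prefix.append(prefix[-1] + (1 if c == "(" else -1 if c == ")" else 0))
--     try:
--         return prefix.index(-1)
--     except ValueError:
--         return prefix[-1]
-- ===== Notes on version B (the rewrite author's own statement) =====
-- stated objective: alternative
-- what changed: Replaces A's two accumulation passes with early return by a prefix-sum table built once, answered by a single first-index search for -1 with the table's last entry as fallback.
import Mathlib
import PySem

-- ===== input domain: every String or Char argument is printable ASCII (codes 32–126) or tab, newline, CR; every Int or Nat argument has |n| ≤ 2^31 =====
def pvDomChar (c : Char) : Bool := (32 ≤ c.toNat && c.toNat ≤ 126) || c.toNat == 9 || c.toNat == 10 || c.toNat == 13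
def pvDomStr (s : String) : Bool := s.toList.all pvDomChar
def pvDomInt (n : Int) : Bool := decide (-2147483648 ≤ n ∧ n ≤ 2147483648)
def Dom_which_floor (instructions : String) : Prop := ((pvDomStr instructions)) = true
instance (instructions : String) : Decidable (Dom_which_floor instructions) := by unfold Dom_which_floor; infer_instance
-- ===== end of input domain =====

-- B replaces A's early-return accumulation + second pass by a prefix-sum table
-- plus a first-index search (objective: alternative decomposition).

-- ===== PORT A =====
-- the Part-2 loop: scans with index i and running floor, early return of i+1 when floor hits -1
def whichFloorLoopA : List Char → Int → Int → Option Int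
  | [], _, _ => none
  | c :: rest, i, floor =>
    let floor' := if c = '(' then floor + 1 else if c = ')' then floor - 1 else floor
    if floor' = -1 then some (i + 1) else whichFloorLoopA rest (i + 1) floor'

def which_floor (instructions : String) : Int :=
  match whichFloorLoopA instructions.toList 0 0 with
  | some r => r
  | none =>
    -- Part 1: re-accumulate from 0
    instructions.toList.foldl
      (fun floor c => if c = '(' then floor + 1 else if c = ')' then floor - 1 else floor) 0

-- ===== PORT B =====
def wfDelta (c : Char) : Int := if c = '(' then 1 else if c = ')' then -1 else 0

def which_floor_alt (instructions : String) : Int :=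
  -- prefix-sum table: prefix[k] = floor after the first k instructions
  let ptab :=
    instructions.toList.foldl (fun acc c => acc ++ [acc.getLastD 0 + wfDelta c]) [0]
  match PySem.List.index? ptab (-1 : Int) with
  | some j => (j : Int)
  | none => ptab.getLastD 0   -- prefix[-1]; the table is never empty

-- ===== PRECONDITION & SPEC =====
def Spec_which_floor (instructions : String) (out : Int) : Prop := out = which_floor_alt instructions
instance (instructions : String) (out : Int) : Decidable (Spec_which_floor instructions out) := by unfold Spec_which_floor; infer_instance

-- ===== CLAIM (what is proved, stated in full; the proofs are below) =====
def Claim_equal_which_floor : Prop := ∀ (instructions : String), Dom_which_floor instructions → Spec_which_floor instructions (which_floor instructions)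

-- ===== LEMMAS AND PROOFS =====

-- B's table build is a scanl
lemma wf_build_scanl (l : List Char) (a : List Int) (x : Int) :
    l.foldl (fun acc c => acc ++ [acc.getLastD 0 + wfDelta c]) (a ++ [x]) =
      a ++ List.scanl (fun f c => f + wfDelta c) x l := by
  induction l generalizing a x with
  | nil => simp [List.scanl_nil]
  | cons c rest ih =>
    rw [List.scanl_cons]
    simp only [List.foldl_cons]
    have h1 : (a ++ [x]).getLastD 0 = x := by simp
    rw [h1]
    have := ih (a ++ [x]) (x + wfDelta c)
    rw [List.append_assoc] at this
    simpa using this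

-- A's step equals B's step
lemma wf_step_eq (f : Int) (c : Char) :
    (if c = '(' then f + 1 else if c = ')' then f - 1 else f) = f + wfDelta c := by
  unfold wfDelta; split_ifs <;> omega

-- the early-return loop vs the first-index search over the scanl
lemma wf_loop_index (l : List Char) (i f : Int) (hf : f ≠ -1) :
    whichFloorLoopA l i f =
      (PySem.List.index? (List.scanl (fun f c => f + wfDelta c) f l) (-1 : Int)).map
        (fun j => i + (j : Int)) := by
  induction l generalizing i f with
  | nil =>
    rw [List.scanl_nil, show PySem.List.index? [f] (-1 : Int) = none from by
      rw [PySem.List.index?_eq_none_iff]; simpa using fun h => hf h.symm]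
    simp [whichFloorLoopA]
  | cons c rest ih =>
    rw [List.scanl_cons, PySem.List.index?_cons_of_ne _ hf]
    simp only [whichFloorLoopA, wf_step_eq]
    by_cases h1 : f + wfDelta c = -1
    · rw [if_pos h1]
      have hcons : ∃ ys, List.scanl (fun f c => f + wfDelta c) (f + wfDelta c) rest =
          (-1 : Int) :: ys := by
        cases rest with
        | nil => exact ⟨[], by rw [List.scanl_nil, h1]⟩
        | cons d ds => exact ⟨_, by rw [List.scanl_cons, h1]⟩
      obtain ⟨ys, hys⟩ := hcons
      rw [hys, PySem.List.index?_cons_self]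
      simp
    · rw [if_neg h1, ih (i + 1) _ h1]
      cases PySem.List.index? (List.scanl (fun f c => f + wfDelta c) (f + wfDelta c) rest) (-1 : Int) with
      | none => simp
      | some j => simp; ring

-- the final fold equals the last entry of the scanl
lemma wf_foldl_scanl_last (l : List Char) (f d : Int) :
    (List.scanl (fun f c => f + wfDelta c) f l).getLastD d =
      l.foldl (fun f c => f + wfDelta c) f := by
  induction l generalizing f d with
  | nil => rw [List.scanl_nil]; rfl
  | cons c rest ih =>
    rw [List.scanl_cons, List.foldl_cons, List.getLastD_cons]
    exact ih (f + wfDelta c) f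

-- ===== VERDICT (by name: the statement is the Claim_ definition above) =====
theorem which_floor_spec : Claim_equal_which_floor := by
  intro s _
  unfold Spec_which_floor which_floor which_floor_alt
  have hbuild := wf_build_scanl s.toList [] 0
  simp only [List.nil_append] at hbuild
  rw [hbuild, wf_loop_index s.toList 0 0 (by decide)]
  cases h : PySem.List.index? (List.scanl (fun f c => f + wfDelta c) 0 s.toList) (-1 : Int) with
  | some j =>
    rw [PySem.List.index?_eq_idxOf?] at h
    simp [h]
  | none =>
    rw [PySem.List.index?_eq_idxOf?] at h
    have hfun : (fun (floor : Int) (c : Char) =>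
        if c = '(' then floor + 1 else if c = ')' then floor - 1 else floor) =
        fun f c => f + wfDelta c := by
      funext f c; exact wf_step_eq f c
    simp [h, hfun]
    rw [← List.getLastD_eq_getLast?, wf_foldl_scanl_last s.toList 0 0]
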